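-- pv_equiv track=rewrite | github.com/deepflare/exphub | exphub/utils/paths.py | shorten_paths
-- ===== SOURCE A (Python) =====
-- def find_longest_common_suffix(all_paths, current_path):
--     """
--     Find the longest common suffix between the current_path and all other paths in all_paths.
--
--     Args:
--         all_paths (List[str]): A list of all path strings.
--         current_path (str): The path string for which the longest common suffix is calculated.
--
--     Returns:
--         int: The length of the longest common suffix.
--     """
--     max_common_suffix_length = 1
--     paths = [path for path in all_paths if path != current_path]
--     for i in range(1, len(current_path.split('/'))):
--         if any('/'.join((path.split('/')[-i:])) == '/'.join(current_path.split('/')[-i:])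
--                for path in paths
--                if len(path.split('/')) >= i):
--             max_common_suffix_length += 1
--         else:
--             break
--
--     return max_common_suffix_length
--
-- def shorten_paths(paths):
--     """
--     Shorten the input paths by finding the longest common suffix for each path and keeping only the required parts to distinguish between them. Also, return a dictionary mapping the original paths to their shortened versions.
--
--     Args:
--         paths (List[str]): A list of input path strings.
--
--     Returns:
--          Dict[str, str]: A dictionary mapping the original paths to their shortened versions.
--     """
--     shortened_paths = []
--     path_mapping = {}
--
--     for path in paths:
--         split_path = path.split('/')
--         max_common_suffix_length = find_longest_common_suffix(paths, path)
--         shortened_path = '/'.join(split_path[-max_common_suffix_length:])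
--         shortened_paths.append(shortened_path)
--         path_mapping[path] = shortened_path
--
--     return path_mapping
-- ===== SOURCE B (Python) =====
-- def shorten_paths(paths):
--     # Index: for every distinct path, count each (length, joined suffix) once.
--     counts = {}
--     for p in dict.fromkeys(paths):
--         comps = p.split('/')
--         n = len(comps)
--         for j in range(1, n + 1):
--             key = (j, '/'.join(comps[n - j:]))
--             counts[key] = counts.get(key, 0) + 1
--     result = {}
--     for p in paths:
--         comps = p.split('/')
--         n = len(comps)
--         k = 1
--         while k < n and counts.get((k, '/'.join(comps[n - k:])), 0) >= 2:
--             k += 1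
--         result[p] = '/'.join(comps[n - k:])
--     return result
-- ===== Notes on version B (the rewrite author's own statement) =====
-- stated objective: faster
-- what changed: A rescans every other path for every path and every suffix length (an any() over all paths inside a per-path loop); B builds one dictionary counting each (component-count, joined-suffix) of each distinct path once, so the per-path inner check becomes a single O(1) lookup.
import Mathlib
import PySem

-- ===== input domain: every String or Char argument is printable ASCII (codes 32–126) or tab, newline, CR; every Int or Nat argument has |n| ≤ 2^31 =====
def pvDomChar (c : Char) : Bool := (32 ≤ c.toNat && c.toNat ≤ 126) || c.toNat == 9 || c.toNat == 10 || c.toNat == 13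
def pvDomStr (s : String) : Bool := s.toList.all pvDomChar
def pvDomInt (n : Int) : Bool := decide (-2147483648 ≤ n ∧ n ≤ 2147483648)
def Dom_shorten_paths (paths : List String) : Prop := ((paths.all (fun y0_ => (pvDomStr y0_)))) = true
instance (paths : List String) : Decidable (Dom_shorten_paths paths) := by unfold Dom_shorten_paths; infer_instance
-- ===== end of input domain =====

-- B replaces A's per-path scan of all other paths by a precomputed index counting each
-- (component-count, joined-suffix) of each distinct path once; objective: faster (inner O(N·L) scan becomes an O(1) lookup).

-- ===== PORT A =====
-- s.split('/'): sep "/" ≠ "", so PySem.Str.split? is always `some`; `.getD []` only unwraps it (exact).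
def pvSplit (s : String) : List String := (PySem.Str.split? s "/").getD []

-- the `for i in range(1, len(...)): if any(...): mcsl += 1 else: break` loop of find_longest_common_suffix
def pvFlcsGo (paths : List String) (curComps : List String) : List Int → Int → Int
  | [], acc => acc
  | i :: rest, acc =>
      if paths.any (fun q =>
           let qs := pvSplit q
           decide ((qs.length : Int) ≥ i) &&
           (PySem.Str.join "/" (PySem.List.slice qs (some (-i)) none) ==
            PySem.Str.join "/" (PySem.List.slice curComps (some (-i)) none)))
      then pvFlcsGo paths curComps rest (acc + 1)
      else acc

def find_longest_common_suffix (all_paths : List String) (current_path : String) : Int :=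
  let paths := all_paths.filter (fun q => q != current_path)
  let curComps := pvSplit current_path
  pvFlcsGo paths curComps (PySem.List.pyRange 1 (curComps.length : Int)) 1

def shorten_paths (paths : List String) : List (String × String) :=
  (paths.foldl (fun (st : List String × PySem.Dict String String) path =>
      let split_path := pvSplit path
      let m := find_longest_common_suffix paths path
      let shortened := PySem.Str.join "/" (PySem.List.slice split_path (some (-m)) none)
      (st.1 ++ [shortened], st.2.insert path shortened))
    ([], PySem.Dict.empty)).2.items

-- ===== PORT B =====
-- the `while k < n and counts.get((k, '/'.join(comps[n-k:])), 0) >= 2: k += 1` loop of Source B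
def pvGrow (counts : PySem.Dict (Int × String) Int) (comps : List String) (n : Nat) (k : Int) : Int :=
  if h : k < (n : Int) then
    if counts.getD (k, PySem.Str.join "/" (PySem.List.slice comps (some ((n : Int) - k)) none)) 0 ≥ 2
    then pvGrow counts comps n (k + 1)
    else k
  else k
termination_by ((n : Int) - k).toNat
decreasing_by omega

def shorten_paths_alt (paths : List String) : List (String × String) :=
  let counts := (PySem.List.dedup paths).foldl (fun d p =>
      let comps := pvSplit p
      let n := comps.length
      (PySem.List.pyRange 1 ((n : Int) + 1)).foldl (fun d j =>
        let key : Int × String := (j, PySem.Str.join "/" (PySem.List.slice comps (some ((n : Int) - j)) none))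
        d.insert key (d.getD key 0 + 1)) d) PySem.Dict.empty
  (paths.foldl (fun (r : PySem.Dict String String) p =>
      let comps := pvSplit p
      let n := comps.length
      let k := pvGrow counts comps n 1
      r.insert p (PySem.Str.join "/" (PySem.List.slice comps (some ((n : Int) - k)) none))) PySem.Dict.empty).items

-- ===== PRECONDITION & SPEC =====
def Spec_shorten_paths (paths : List String) (out : List (String × String)) : Prop := out = shorten_paths_alt paths
instance (paths : List String) (out : List (String × String)) : Decidable (Spec_shorten_paths paths out) := by unfold Spec_shorten_paths; infer_instance

-- ===== CLAIM (what is proved, stated in full; the proofs are below) =====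
def Claim_equal_shorten_paths : Prop := ∀ (paths : List String), Dom_shorten_paths paths → Spec_shorten_paths paths (shorten_paths paths)

-- ===== LEMMAS AND PROOFS =====

-- the key list one distinct path contributes to B's index
def pvKeyList (q : String) : List (Int × String) :=
  let comps := pvSplit q
  (PySem.List.pyRange 1 ((comps.length : Int) + 1)).map
    (fun j => (j, PySem.Str.join "/" (PySem.List.slice comps (some ((comps.length : Int) - j)) none)))

-- B's index dict, named for the proofs (definitionally the `counts` of shorten_paths_alt)
def pvCounts (paths : List String) : PySem.Dict (Int × String) Int :=
  (PySem.List.dedup paths).foldl (fun d p =>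
      let comps := pvSplit p
      let n := comps.length
      (PySem.List.pyRange 1 ((n : Int) + 1)).foldl (fun d j =>
        let key : Int × String := (j, PySem.Str.join "/" (PySem.List.slice comps (some ((n : Int) - j)) none))
        d.insert key (d.getD key 0 + 1)) d) PySem.Dict.empty

lemma pvCounts_eq_counter (paths : List String) :
    pvCounts paths = PySem.Dict.counter ((PySem.List.dedup paths).flatMap pvKeyList) := by
  unfold pvCounts
  rw [← PySem.Dict.foldl_insert_getD_add_one_eq_counter, List.foldl_flatMap]
  refine PySem.List.foldl_congr_mem _ _ _ _ ?_
  intro acc p _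
  simp only [pvKeyList, List.foldl_map]

lemma pvRange_nil (a b : Int) (h : b ≤ a) : PySem.List.pyRange a b = [] := by
  simp [PySem.List.pyRange]; omega

lemma pvCountP_pyRange_pair (a b : Int) (g : Int → String) (k : Int) (s : String) :
    List.countP (fun j => ((j, g j) : Int × String) == (k, s)) (PySem.List.pyRange a b)
      = if a ≤ k ∧ k < b ∧ g k = s then 1 else 0 := by
  by_cases hab : a < b
  · have h : ∀ m : Nat, ∀ a : Int, a < b → (b - a).toNat = m →
        List.countP (fun j => ((j, g j) : Int × String) == (k, s)) (PySem.List.pyRange a b)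
          = if a ≤ k ∧ k < b ∧ g k = s then 1 else 0 := by
      intro m
      induction m with
      | zero => intro a ha h0; omega
      | succ m ih =>
        intro a ha hm
        rw [PySem.List.pyRange_one_cons ha, List.countP_cons]
        have hrest : List.countP (fun j => ((j, g j) : Int × String) == (k, s)) (PySem.List.pyRange (a+1) b)
            = if a + 1 ≤ k ∧ k < b ∧ g k = s then 1 else 0 := by
          by_cases h1 : a + 1 < b
          · exact ih (a+1) h1 (by omega)
          · rw [pvRange_nil (a+1) b (by omega)]
            simp only [List.countP_nil]
            rw [if_neg (fun h => by omega)]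
        rw [hrest]
        by_cases hb : a = k ∧ g a = s
        · obtain ⟨h1, h2⟩ := hb; subst h1
          rw [if_pos (show (((a, g a) : Int × String) == (a, s)) = true by simp [h2])]
          rw [if_neg (show ¬(a+1 ≤ a ∧ a < b ∧ g a = s) from fun h => by omega)]
          rw [if_pos (show a ≤ a ∧ a < b ∧ g a = s from ⟨le_refl a, ha, h2⟩)]
        · rw [if_neg (show ¬(((a, g a) : Int × String) == (k, s)) = true by
            simp only [beq_iff_eq, Prod.mk.injEq, not_and]
            intro h1 h2; exact hb ⟨h1, h2⟩)]
          rw [add_zero]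
          congr 1
          apply propext
          constructor
          · rintro ⟨h1, h2, h3⟩; exact ⟨by omega, h2, h3⟩
          · rintro ⟨h1, h2, h3⟩
            refine ⟨?_, h2, h3⟩
            rcases eq_or_lt_of_le h1 with rfl | h
            · exact absurd ⟨rfl, h3⟩ hb
            · omega
    exact h _ a hab rfl
  · rw [pvRange_nil a b (by omega)]
    simp only [List.countP_nil]
    rw [if_neg (fun h => by omega)]

lemma pvCount_keyList (q : String) (k : Int) (s : String) :
    (pvKeyList q).count (k, s)
      = if 1 ≤ k ∧ k ≤ ((pvSplit q).length : Int)
            ∧ PySem.Str.join "/" (PySem.List.slice (pvSplit q) (some (((pvSplit q).length : Int) - k)) none) = s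
        then 1 else 0 := by
  unfold pvKeyList
  rw [List.count_eq_countP, List.countP_map]
  have := pvCountP_pyRange_pair 1 (((pvSplit q).length : Int) + 1)
    (fun j => PySem.Str.join "/" (PySem.List.slice (pvSplit q) (some (((pvSplit q).length : Int) - j)) none)) k s
  simp only [Function.comp_def]
  rw [this]
  congr 1
  apply propext
  constructor
  · rintro ⟨h1, h2, h3⟩; exact ⟨h1, by omega, h3⟩
  · rintro ⟨h1, h2, h3⟩; exact ⟨h1, by omega, h3⟩

lemma pvSum_indicator {α : Type} (l : List α) (p : α → Bool) :
    (l.map (fun x => if p x then 1 else 0)).sum = l.countP p := by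
  induction l with
  | nil => simp
  | cons x xs ih =>
    simp [List.countP_cons, ih]
    by_cases h : p x
    · simp [h]; omega
    · simp [h]

lemma pvCountP_ge_two (l : List String) (P : String → Bool) (p : String)
    (hnd : l.Nodup) (hp : p ∈ l) (hPp : P p = true) :
    2 ≤ l.countP P ↔ ∃ q ∈ l, q ≠ p ∧ P q = true := by
  have hperm := List.perm_cons_erase hp
  rw [hperm.countP_eq, List.countP_cons, if_pos hPp]
  constructor
  · intro h
    have : 0 < (l.erase p).countP P := by omega
    obtain ⟨q, hq, hPq⟩ := List.countP_pos_iff.mp this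
    have := (hnd.mem_erase_iff).mp hq
    exact ⟨q, this.2, this.1, hPq⟩
  · rintro ⟨q, hq, hne, hPq⟩
    have : 0 < (l.erase p).countP P :=
      List.countP_pos_iff.mpr ⟨q, (hnd.mem_erase_iff).mpr ⟨hne, hq⟩, hPq⟩
    omega

-- both slice forms are the same drop when 1 ≤ k ≤ n
lemma pvSlice_eq (comps : List String) (k : Int) (h1 : 1 ≤ k) (h2 : k ≤ (comps.length : Int)) :
    PySem.List.slice comps (some ((comps.length : Int) - k)) none
      = PySem.List.slice comps (some (-k)) none := by
  have hk : k = (k.toNat : Int) := by omega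
  rw [PySem.List.slice_from comps (by omega)]
  rw [hk, PySem.List.slice_from_neg_natCast comps k.toNat (by omega)]
  congr 1
  omega

-- the central condition equivalence: A's `any` scan = B's index lookup
lemma pvCond_iff (paths : List String) (p : String) (hp : p ∈ paths) (k : Int)
    (h1 : 1 ≤ k) (h2 : k < ((pvSplit p).length : Int)) :
    ((paths.filter (fun q => q != p)).any (fun q =>
         let qs := pvSplit q
         decide ((qs.length : Int) ≥ k) &&
         (PySem.Str.join "/" (PySem.List.slice qs (some (-k)) none) ==
          PySem.Str.join "/" (PySem.List.slice (pvSplit p) (some (-k)) none))) = true)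
    ↔ 2 ≤ (pvCounts paths).getD
            (k, PySem.Str.join "/" (PySem.List.slice (pvSplit p) (some (((pvSplit p).length : Int) - k)) none)) 0 := by
  set s := PySem.Str.join "/" (PySem.List.slice (pvSplit p) (some (((pvSplit p).length : Int) - k)) none) with hs
  set P : String → Bool := fun q => decide (1 ≤ k ∧ k ≤ ((pvSplit q).length : Int)
      ∧ PySem.Str.join "/" (PySem.List.slice (pvSplit q) (some (((pvSplit q).length : Int) - k)) none) = s) with hP
  have hcnt : (pvCounts paths).getD (k, s) 0 = ((PySem.List.dedup paths).countP P : Int) := by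
    rw [pvCounts_eq_counter, PySem.Dict.getD_counter, List.count_flatMap]
    congr 1
    rw [← pvSum_indicator]
    congr 1
    apply List.map_congr_left
    intro q _
    simp only [Function.comp_def, pvCount_keyList, hP, decide_eq_true_eq]
  rw [hcnt]
  have hcast : (2 : Int) ≤ ((PySem.List.dedup paths).countP P : Int) ↔ 2 ≤ (PySem.List.dedup paths).countP P := by
    exact_mod_cast Iff.rfl
  rw [hcast]
  have hPp : P p = true := by
    simp only [hP, decide_eq_true_eq]
    exact ⟨h1, by omega, rfl⟩
  rw [pvCountP_ge_two (PySem.List.dedup paths) P p (PySem.List.nodup_dedup paths)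
      ((PySem.List.mem_dedup paths p).mpr hp) hPp]
  rw [List.any_eq_true]
  constructor
  · rintro ⟨q, hq, hbody⟩
    obtain ⟨hqmem, hqne⟩ := List.mem_filter.mp hq
    simp only [Bool.and_eq_true, decide_eq_true_eq, beq_iff_eq] at hbody
    obtain ⟨hlen, hjoin⟩ := hbody
    refine ⟨q, (PySem.List.mem_dedup paths q).mpr hqmem, bne_iff_ne.mp hqne, ?_⟩
    simp only [hP, decide_eq_true_eq]
    refine ⟨h1, by omega, ?_⟩
    rw [pvSlice_eq (pvSplit q) k h1 (by omega), hjoin, hs,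
        pvSlice_eq (pvSplit p) k h1 (by omega)]
  · rintro ⟨q, hq, hne, hPq⟩
    simp only [hP, decide_eq_true_eq] at hPq
    obtain ⟨_, hlen, hjoin⟩ := hPq
    refine ⟨q, List.mem_filter.mpr ⟨(PySem.List.mem_dedup paths q).mp hq, bne_iff_ne.mpr hne⟩, ?_⟩
    simp only [Bool.and_eq_true, decide_eq_true_eq, beq_iff_eq]
    refine ⟨by omega, ?_⟩
    rw [← pvSlice_eq (pvSplit q) k h1 (by omega), hjoin, hs,
        pvSlice_eq (pvSplit p) k h1 (by omega)]

lemma pvLoop_eq (paths : List String) (p : String) (hp : p ∈ paths) :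
    ∀ a : Int, 1 ≤ a →
      pvFlcsGo (paths.filter (fun q => q != p)) (pvSplit p)
          (PySem.List.pyRange a ((pvSplit p).length : Int)) a
        = pvGrow (pvCounts paths) (pvSplit p) (pvSplit p).length a := by
  have main : ∀ m : Nat, ∀ a : Int, 1 ≤ a → (((pvSplit p).length : Int) - a).toNat ≤ m →
      pvFlcsGo (paths.filter (fun q => q != p)) (pvSplit p)
          (PySem.List.pyRange a ((pvSplit p).length : Int)) a
        = pvGrow (pvCounts paths) (pvSplit p) (pvSplit p).length a := by
    intro m
    induction m with
    | zero =>
      intro a ha hm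
      rw [pvRange_nil _ _ (by omega)]
      rw [pvGrow]
      simp only [pvFlcsGo]
      rw [dif_neg (by omega)]
    | succ m ih =>
      intro a ha hm
      by_cases hlt : a < ((pvSplit p).length : Int)
      · rw [PySem.List.pyRange_one_cons hlt]
        rw [pvGrow, dif_pos hlt]
        simp only [pvFlcsGo]
        by_cases hcond : ((paths.filter (fun q => q != p)).any (fun q =>
            let qs := pvSplit q
            decide ((qs.length : Int) ≥ a) &&
            (PySem.Str.join "/" (PySem.List.slice qs (some (-a)) none) ==
             PySem.Str.join "/" (PySem.List.slice (pvSplit p) (some (-a)) none))) = true)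
        · rw [if_pos hcond, if_pos ((pvCond_iff paths p hp a ha hlt).mp hcond)]
          exact ih (a+1) (by omega) (by omega)
        · rw [if_neg hcond, if_neg (fun hc => hcond ((pvCond_iff paths p hp a ha hlt).mpr hc))]
      · rw [pvRange_nil _ _ (by omega)]
        rw [pvGrow]
        simp only [pvFlcsGo]
        rw [dif_neg (by omega)]
  intro a ha
  exact main (((pvSplit p).length : Int) - a).toNat a ha (le_refl _)

lemma pvGrow_ge (counts : PySem.Dict (Int × String) Int) (comps : List String) (n : Nat) (k : Int) :
    k ≤ pvGrow counts comps n k := by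
  induction k using pvGrow.induct counts comps n with
  | case1 k h hc ih => rw [pvGrow, dif_pos h, if_pos hc]; omega
  | case2 k h hc => rw [pvGrow, dif_pos h, if_neg hc]
  | case3 k h => rw [pvGrow, dif_neg h]

lemma pvGrow_le (counts : PySem.Dict (Int × String) Int) (comps : List String) (n : Nat) (k : Int)
    (h : k ≤ (n : Int)) : pvGrow counts comps n k ≤ (n : Int) := by
  induction k using pvGrow.induct counts comps n with
  | case1 k hlt hc ih => rw [pvGrow, dif_pos hlt, if_pos hc]; exact ih (by omega)
  | case2 k hlt hc => rw [pvGrow, dif_pos hlt, if_neg hc]; omega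
  | case3 k hlt => rw [pvGrow, dif_neg hlt]; omega

-- per-path value agreement
lemma pvVal_eq (paths : List String) (p : String) (hp : p ∈ paths) :
    PySem.Str.join "/" (PySem.List.slice (pvSplit p) (some (-(find_longest_common_suffix paths p))) none)
      = PySem.Str.join "/" (PySem.List.slice (pvSplit p)
          (some ((((pvSplit p).length : Int)) - pvGrow (pvCounts paths) (pvSplit p) (pvSplit p).length 1)) none) := by
  have hflcs : find_longest_common_suffix paths p
      = pvGrow (pvCounts paths) (pvSplit p) (pvSplit p).length 1 := by
    unfold find_longest_common_suffix
    exact pvLoop_eq paths p hp 1 (by omega)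
  rw [hflcs]
  set g := pvGrow (pvCounts paths) (pvSplit p) (pvSplit p).length 1 with hg
  have hge : 1 ≤ g := pvGrow_ge _ _ _ 1
  by_cases hn : 1 ≤ (pvSplit p).length
  · have hle : g ≤ ((pvSplit p).length : Int) := pvGrow_le _ _ _ 1 (by exact_mod_cast hn)
    rw [pvSlice_eq (pvSplit p) g hge hle]
  · have hn0 : (pvSplit p).length = 0 := by omega
    have hg1 : g = 1 := by
      rw [hg, pvGrow, dif_neg (by omega)]
    rw [hg1, hn0]
    norm_num

-- the two output folds agree elementwise, hence produce the same dict
lemma pvFold_eq (paths : List String) (l : List String) (hl : ∀ p ∈ l, p ∈ paths) :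
    ∀ (sp : List String) (d : PySem.Dict String String),
      (l.foldl (fun (st : List String × PySem.Dict String String) path =>
          let split_path := pvSplit path
          let m := find_longest_common_suffix paths path
          let shortened := PySem.Str.join "/" (PySem.List.slice split_path (some (-m)) none)
          (st.1 ++ [shortened], st.2.insert path shortened)) (sp, d)).2
        = l.foldl (fun (r : PySem.Dict String String) p =>
            let comps := pvSplit p
            let n := comps.length
            let k := pvGrow (pvCounts paths) comps n 1
            r.insert p (PySem.Str.join "/" (PySem.List.slice comps (some ((n : Int) - k)) none))) d := by
  induction l with
  | nil => intro sp d; rfl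
  | cons x xs ih =>
    intro sp d
    simp only [List.foldl_cons]
    rw [← pvVal_eq paths x (hl x (List.mem_cons_self))]
    exact ih (fun p hp => hl p (List.mem_cons_of_mem x hp)) _ _

-- ===== VERDICT (by name: the statement is the Claim_ definition above) =====
theorem shorten_paths_spec : Claim_equal_shorten_paths := by
  intro paths _
  unfold Spec_shorten_paths shorten_paths shorten_paths_alt
  exact congrArg PySem.Dict.items (pvFold_eq paths paths (fun p hp => hp) [] PySem.Dict.empty)
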